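-- pv_equiv track=rewrite | github.com/ssudweeks/advent-of-code | sls/day4.py | seperate_input_boards
-- ===== SOURCE A (Python) =====
-- def seperate_input_boards(input):
--     calls = input.pop(0)
--     input.pop(0)
--     boards = []
--
--     board = []
--     for x in range(len(input)):
--         row = input[x]
--         if row == '':
--             boards.append(board)
--             board = []
--             continue
--         else:
--             board.append(input[x])
--     boards.append(board)
--
--     return calls, boards
-- ===== SOURCE B (Python) =====
-- def seperate_input_boards(input):
--     # Same first two pops as A (same observable mutation of the argument).
--     calls = input.pop(0)
--     input.pop(0)
--     boards = []
--     rest = input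
--     while '' in rest:
--         i = rest.index('')
--         boards.append(rest[:i])
--         rest = rest[i + 1:]
--     boards.append(rest)
--     return calls, boards
-- ===== Notes on version B (the rewrite author's own statement) =====
-- stated objective: alternative
-- what changed: B replaces A's element-by-element accumulator loop with a find-next-separator-and-slice loop: it repeatedly locates the next '' with list.index and appends the whole slice before it as a board.
import Mathlib
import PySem

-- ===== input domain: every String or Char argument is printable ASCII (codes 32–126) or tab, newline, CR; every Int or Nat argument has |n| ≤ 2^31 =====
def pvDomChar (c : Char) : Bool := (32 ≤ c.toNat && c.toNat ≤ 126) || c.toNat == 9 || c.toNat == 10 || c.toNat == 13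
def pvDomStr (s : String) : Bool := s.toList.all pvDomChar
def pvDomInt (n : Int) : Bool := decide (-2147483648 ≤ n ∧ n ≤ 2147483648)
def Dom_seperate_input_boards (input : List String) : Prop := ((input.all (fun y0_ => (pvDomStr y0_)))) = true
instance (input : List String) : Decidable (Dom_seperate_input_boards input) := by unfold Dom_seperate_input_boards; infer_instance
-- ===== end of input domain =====

-- B replaces A's element-by-element accumulator loop with a find-next-''-and-slice loop;
-- same cost. Both programs pop the first two elements of the argument in place (same mutation);
-- the equivalence proved here is about the return value.

-- ===== PORT A =====
-- the for-loop over range(len(rest)) reading rest[x], as a fold over rest with state (boards, board)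
def seperate_input_boards (input : List String) : String × List (List String) :=
  match input with
  | calls :: _ :: rest =>
      let p := rest.foldl
        (fun (acc : List (List String) × List String) row =>
          if row = "" then (acc.1 ++ [acc.2], ([] : List String))
          else (acc.1, acc.2 ++ [row]))
        ([], [])
      (calls, p.1 ++ [p.2])
  | _ => ("", [])   -- unreachable: Pre_ requires input.length ≥ 2 (the two pops raise IndexError otherwise)

-- ===== PORT B =====
-- B's while loop: `'' in rest` ↔ index? rest "" is some i (same scan); then slice before/after i
def sibAltLoop (rest : List String) (boards : List (List String)) : List (List String) :=
  match h : PySem.List.index? rest "" with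
  | none => boards ++ [rest]
  | some i =>
      sibAltLoop (PySem.List.slice rest (some ((i : Int) + 1)) none)
        (boards ++ [PySem.List.slice rest none (some (i : Int))])
termination_by rest.length
decreasing_by
  have := PySem.List.getElem_of_index?_eq_some h
  obtain ⟨hk, -, -⟩ := this
  have : ((i : Int) + 1) = ((i + 1 : Nat) : Int) := by push_cast; ring
  rw [this, PySem.List.slice_from_natCast]
  simp [List.length_drop]
  omega

def seperate_input_boards_alt (input : List String) : String × List (List String) :=
  match input with
  | calls :: rest0 =>
      match rest0 with
      | _ :: rest => (calls, sibAltLoop rest [])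
      | [] => ("", [])   -- unreachable: Pre_ requires input.length ≥ 2
  | [] => ("", [])       -- unreachable: Pre_ requires input.length ≥ 2

-- ===== PRECONDITION & SPEC =====
-- A pops the first two elements; on lists of length < 2 Python raises IndexError (B likewise).
def Pre_seperate_input_boards (input : List String) : Prop := 2 ≤ input.length
instance (input : List String) : Decidable (Pre_seperate_input_boards input) := by
  unfold Pre_seperate_input_boards; infer_instance

def pvWitness_seperate_input_boards : List String := ["7,4,9", "", "1 2", "3 4", "", "5 6"]

def Spec_seperate_input_boards (input : List String) (out : String × List (List String)) : Prop := out = seperate_input_boards_alt input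
instance (input : List String) (out : String × List (List String)) : Decidable (Spec_seperate_input_boards input out) := by unfold Spec_seperate_input_boards; infer_instance

-- ===== CLAIM (what is proved, stated in full; the proofs are below) =====
def Claim_equal_seperate_input_boards : Prop := ∀ (input : List String), Dom_seperate_input_boards input → Pre_seperate_input_boards input → Spec_seperate_input_boards input (seperate_input_boards input)

-- ===== LEMMAS AND PROOFS =====

-- reference splitter: the list of boards cut at the '' separators
def sibSplit (cur : List String) : List String → List (List String)
  | [] => [cur]
  | r :: t => if r = "" then cur :: sibSplit [] t else sibSplit (cur ++ [r]) t

theorem sibA_loop_eq (rest : List String) :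
    ∀ (boards : List (List String)) (board : List String),
      (let p := rest.foldl
        (fun (acc : List (List String) × List String) row =>
          if row = "" then (acc.1 ++ [acc.2], ([] : List String))
          else (acc.1, acc.2 ++ [row]))
        (boards, board)
       p.1 ++ [p.2]) = boards ++ sibSplit board rest := by
  induction rest with
  | nil => intro boards board; simp [sibSplit]
  | cons r t ih =>
    intro boards board
    by_cases hr : r = ""
    · simp only [List.foldl_cons, hr, reduceIte, sibSplit]
      rw [ih]; simp
    · simp only [List.foldl_cons, sibSplit, reduceIte, hr]
      rw [ih]

theorem sibSplit_no_sep (rest : List String) (h : "" ∉ rest) :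
    ∀ cur, sibSplit cur rest = [cur ++ rest] := by
  induction rest with
  | nil => intro cur; simp [sibSplit]
  | cons r t ih =>
    intro cur
    have hr : r ≠ "" := by rintro rfl; exact h List.mem_cons_self
    have ht : "" ∉ t := fun hm => h (List.mem_cons_of_mem _ hm)
    simp [sibSplit, hr, ih ht]

theorem sibSplit_append (pre : List String) (suf : List String) (h : "" ∉ pre) :
    ∀ cur, sibSplit cur (pre ++ "" :: suf) = (cur ++ pre) :: sibSplit [] suf := by
  induction pre with
  | nil => intro cur; simp [sibSplit]
  | cons r t ih =>
    intro cur
    have hr : r ≠ "" := by rintro rfl; exact h List.mem_cons_self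
    have ht : "" ∉ t := fun hm => h (List.mem_cons_of_mem _ hm)
    simp [sibSplit, hr, ih ht]

theorem sibAltLoop_eq (rest : List String) :
    ∀ boards, sibAltLoop rest boards = boards ++ sibSplit [] rest := by
  induction rest using sibAltLoop.induct (boards := []) with
  | case1 rest boards h =>
    intro bs
    rw [sibAltLoop]
    split
    · rw [sibSplit_no_sep rest (by rwa [← PySem.List.index?_eq_none_iff (v := "")] )]
      simp
    · rename_i i' h'; rw [h] at h'; cases h'
  | case2 rest boards i h ih =>
    intro bs
    rw [sibAltLoop]
    obtain ⟨pre, suf, hsplit, hlen, hnot⟩ := (PySem.List.index?_eq_some_iff _ _ _).mp h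
    have hcast : ((i : Int) + 1) = ((i + 1 : Nat) : Int) := by push_cast; ring
    have hfrom : PySem.List.slice rest (some ((i : Int) + 1)) none = suf := by
      rw [hcast, PySem.List.slice_from_natCast, hsplit, ← hlen]
      simp
    have hto : PySem.List.slice rest none (some (i : Int)) = pre := by
      rw [PySem.List.slice_to_natCast, hsplit, ← hlen]
      simp
    rw [hfrom] at ih
    split
    · rename_i h'; rw [h] at h'; cases h'
    · rename_i i' h'
      rw [h] at h'; injection h' with hi; subst hi
      rw [hfrom, hto, ih, hsplit, sibSplit_append pre suf hnot]
      simp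

-- ===== VERDICT (by name: the statement is the Claim_ definition above) =====
theorem seperate_input_boards_spec : Claim_equal_seperate_input_boards := by
  intro input _ hpre
  unfold Spec_seperate_input_boards
  match input with
  | [] => simp [Pre_seperate_input_boards] at hpre
  | [_] => simp [Pre_seperate_input_boards] at hpre
  | calls :: x :: rest =>
    show seperate_input_boards (calls :: x :: rest) = seperate_input_boards_alt (calls :: x :: rest)
    unfold seperate_input_boards seperate_input_boards_alt
    simp only
    rw [sibAltLoop_eq rest []]
    have := sibA_loop_eq rest [] []
    simp only at this
    rw [this]
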